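-- pv_equiv track=rewrite | github.com/Jyotsna03/DSA-GFG | Difficulty: Medium/Max sum path in two arrays/max-sum-path-in-two-arrays.py | maxSumPath
-- ===== SOURCE A (Python) =====
-- def maxSumPath(arr1, arr2, m, n):
--     i, j = 0, 0
--     result, sum1, sum2 = 0, 0, 0
--
--     while i < m and j < n:
--         if arr1[i] < arr2[j]:
--             sum1 += arr1[i]
--             i += 1
--         elif arr1[i] > arr2[j]:
--             sum2 += arr2[j]
--             j += 1
--         else:
--             result += max(sum1, sum2) + arr1[i]
--             sum1, sum2 = 0, 0
--             i += 1
--             j += 1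
--
--     while i < m:
--         sum1 += arr1[i]
--         i += 1
--
--     while j < n:
--         sum2 += arr2[j]
--         j += 1
--
--     result += max(sum1, sum2)
--
--     return result
-- ===== SOURCE B (Python) =====
-- def maxSumPath(arr1, arr2, m, n):
--     # Phase 1: two-pointer merge only to record matched index pairs.
--     matches = []
--     i, j = 0, 0
--     while i < m and j < n:
--         if arr1[i] < arr2[j]:
--             i += 1
--         elif arr1[i] > arr2[j]:
--             j += 1
--         else:
--             matches.append((i, j))
--             i += 1
--             j += 1
--
--     # Phase 2: prefix sums of the two considered prefixes.
--     mm, nn = max(m, 0), max(n, 0)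
--     P1, s = [0], 0
--     for x in arr1[:mm]:
--         s += x
--         P1.append(s)
--     P2, s = [0], 0
--     for x in arr2[:nn]:
--         s += x
--         P2.append(s)
--
--     # Phase 3: sum segment maxima between consecutive match points.
--     result, pi, pj = 0, 0, 0
--     for (i, j) in matches:
--         result += max(P1[i] - P1[pi], P2[j] - P2[pj]) + arr1[i]
--         pi, pj = i + 1, j + 1
--     return result + max(P1[mm] - P1[pi], P2[nn] - P2[pj])
-- ===== Notes on version B (the rewrite author's own statement) =====
-- stated objective: alternative
-- what changed: B replaces A's single merge loop with inline running sums by three phases: a merge that only records matched index pairs, prefix-sum tables for both arrays, and a segment-indexed pass taking max of prefix-sum differences per segment.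
import Mathlib
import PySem

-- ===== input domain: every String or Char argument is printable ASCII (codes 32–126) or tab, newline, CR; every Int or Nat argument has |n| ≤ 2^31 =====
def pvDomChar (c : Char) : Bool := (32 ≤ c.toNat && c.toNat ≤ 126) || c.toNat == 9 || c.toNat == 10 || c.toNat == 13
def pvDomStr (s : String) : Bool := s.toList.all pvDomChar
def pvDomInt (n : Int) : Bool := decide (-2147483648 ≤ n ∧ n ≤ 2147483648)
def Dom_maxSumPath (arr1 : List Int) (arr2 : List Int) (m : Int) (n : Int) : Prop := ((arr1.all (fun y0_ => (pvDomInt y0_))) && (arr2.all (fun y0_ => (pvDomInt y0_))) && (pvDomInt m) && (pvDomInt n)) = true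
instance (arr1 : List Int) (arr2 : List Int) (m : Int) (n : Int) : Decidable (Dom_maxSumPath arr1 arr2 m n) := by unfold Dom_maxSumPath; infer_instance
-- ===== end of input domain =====

-- B restructures A's one merge loop with inline running sums into three phases (record match
-- pairs, prefix-sum tables, segment pass); same cost, alternative decomposition.
-- Both loops are ported with an explicit fuel counter (m.toNat + n.toNat steps always suffice);
-- the fuel is only a totality guard, the branch structure is the Python's.

-- ===== PORT A =====
-- the main 'while i < m and j < n' merge loop; state (i, j, result, sum1, sum2)
def pvA_loop1 (a b : List Int) (m n : Int) :
    Nat → Nat → Nat → Int → Int → Int → Nat × Nat × Int × Int × Int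
  | 0, i, j, res, s1, s2 => (i, j, res, s1, s2)
  | fuel + 1, i, j, res, s1, s2 =>
    if (i : Int) < m ∧ (j : Int) < n then
      let x := (PySem.List.pyGet? a (i : Int)).getD 0   -- arr1[i]; in range under Pre_
      let y := (PySem.List.pyGet? b (j : Int)).getD 0   -- arr2[j]; in range under Pre_
      if x < y then pvA_loop1 a b m n fuel (i + 1) j res (s1 + x) s2
      else if y < x then pvA_loop1 a b m n fuel i (j + 1) res s1 (s2 + y)
      else pvA_loop1 a b m n fuel (i + 1) (j + 1) (res + max s1 s2 + x) 0 0
    else (i, j, res, s1, s2)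

-- a trailing 'while i < bound: s += arr[i]' loop
def pvA_tail (a : List Int) (m : Int) : Nat → Nat → Int → Int
  | 0, _, s => s
  | fuel + 1, i, s =>
    if (i : Int) < m then pvA_tail a m fuel (i + 1) (s + (PySem.List.pyGet? a (i : Int)).getD 0)
    else s

def maxSumPath (arr1 : List Int) (arr2 : List Int) (m : Int) (n : Int) : Int :=
  let st := pvA_loop1 arr1 arr2 m n (m.toNat + n.toNat) 0 0 0 0 0
  let s1 := pvA_tail arr1 m m.toNat st.1 st.2.2.2.1
  let s2 := pvA_tail arr2 n n.toNat st.2.1 st.2.2.2.2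
  st.2.2.1 + max s1 s2

-- ===== PORT B =====
-- Phase 1: the merge, recording only matched index pairs
def pvB_matches (a b : List Int) (m n : Int) : Nat → Nat → Nat → List (Nat × Nat)
  | 0, _, _ => []
  | fuel + 1, i, j =>
    if (i : Int) < m ∧ (j : Int) < n then
      let x := (PySem.List.pyGet? a (i : Int)).getD 0
      let y := (PySem.List.pyGet? b (j : Int)).getD 0
      if x < y then pvB_matches a b m n fuel (i + 1) j
      else if y < x then pvB_matches a b m n fuel i (j + 1)
      else (i, j) :: pvB_matches a b m n fuel (i + 1) (j + 1)
    else []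

-- Phase 2: 'P = [0]; s = 0; for x in prefix: s += x; P.append(s)'
def pvB_prefix (xs : List Int) : List Int :=
  (xs.foldl (fun (acc : List Int × Int) x => (acc.1 ++ [acc.2 + x], acc.2 + x)) ([0], 0)).1

def maxSumPath_alt (arr1 : List Int) (arr2 : List Int) (m : Int) (n : Int) : Int :=
  let mm := m.toNat                                   -- max(m, 0)
  let nn := n.toNat
  let P1 := pvB_prefix (arr1.take mm)                 -- arr1[:mm], mm ≥ 0
  let P2 := pvB_prefix (arr2.take nn)
  let ms := pvB_matches arr1 arr2 m n (mm + nn) 0 0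
  -- Phase 3: fold over match points with state (result, pi, pj); nonneg indexing via getD
  let st := ms.foldl (fun (st : Int × Nat × Nat) ij =>
      (st.1 + max (P1.getD ij.1 0 - P1.getD st.2.1 0) (P2.getD ij.2 0 - P2.getD st.2.2 0)
          + arr1.getD ij.1 0,
       ij.1 + 1, ij.2 + 1)) (0, 0, 0)
  st.1 + max (P1.getD mm 0 - P1.getD st.2.1 0) (P2.getD nn 0 - P2.getD st.2.2 0)

-- ===== PRECONDITION & SPEC =====
-- Pre_ excludes exactly the inputs where A raises IndexError: m (resp. n) larger than the array length.
def Pre_maxSumPath (arr1 : List Int) (arr2 : List Int) (m : Int) (n : Int) : Prop :=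
  m ≤ (arr1.length : Int) ∧ n ≤ (arr2.length : Int)
instance (arr1 : List Int) (arr2 : List Int) (m : Int) (n : Int) : Decidable (Pre_maxSumPath arr1 arr2 m n) := by unfold Pre_maxSumPath; infer_instance

def pvWitness_maxSumPath : List Int × List Int × Int × Int := ([1, 5, 7], [2, 5, 9], 3, 3)

def Spec_maxSumPath (arr1 : List Int) (arr2 : List Int) (m : Int) (n : Int) (out : Int) : Prop := out = maxSumPath_alt arr1 arr2 m n
instance (arr1 : List Int) (arr2 : List Int) (m : Int) (n : Int) (out : Int) : Decidable (Spec_maxSumPath arr1 arr2 m n out) := by unfold Spec_maxSumPath; infer_instance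

-- ===== CLAIM (what is proved, stated in full; the proofs are below) =====
def Claim_equal_maxSumPath : Prop := ∀ (arr1 : List Int) (arr2 : List Int) (m : Int) (n : Int), Dom_maxSumPath arr1 arr2 m n → Pre_maxSumPath arr1 arr2 m n → Spec_maxSumPath arr1 arr2 m n (maxSumPath arr1 arr2 m n)

-- ===== LEMMAS AND PROOFS =====

-- partial sums starting from s
def pvPsums (s : Int) : List Int → List Int
  | [] => []
  | x :: t => (s + x) :: pvPsums (s + x) t

theorem pvB_prefix_fold (xs : List Int) : ∀ (p : List Int) (s : Int),
    xs.foldl (fun (acc : List Int × Int) x => (acc.1 ++ [acc.2 + x], acc.2 + x)) (p, s)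
      = (p ++ pvPsums s xs, s + xs.sum) := by
  induction xs with
  | nil => intro p s; simp [pvPsums]
  | cons x t ih =>
      intro p s
      simp only [List.foldl_cons, ih, pvPsums, Prod.mk.injEq]
      exact ⟨by simp, by simp; ring⟩

theorem pvPsums_getD (xs : List Int) : ∀ (s : Int) (k : Nat), k < xs.length →
    (pvPsums s xs).getD k 0 = s + (xs.take (k + 1)).sum := by
  induction xs with
  | nil => intro s k h; simp at h
  | cons x t ih =>
      intro s k h
      cases k with
      | zero => simp [pvPsums]
      | succ k =>
          simp only [pvPsums, List.getD_cons_succ, List.take_succ_cons, List.sum_cons]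
          rw [ih (s + x) k (by simpa using h)]
          ring

-- characterization of the prefix table
theorem pvB_prefix_getD (xs : List Int) (k : Nat) (hk : k ≤ xs.length) :
    (pvB_prefix xs).getD k 0 = (xs.take k).sum := by
  unfold pvB_prefix
  rw [pvB_prefix_fold]
  cases k with
  | zero => simp
  | succ k =>
      have hlt : k < xs.length := by omega
      simp only [List.cons_append, List.nil_append, List.getD_cons_succ]
      exact pvPsums_getD xs 0 (k + 1 - 1) (by omega) |>.trans (by simp)

-- segment sum notation used throughout: sum of the first k of the first mm elements
def pvQ (xs : List Int) (mm k : Nat) : Int := ((xs.take mm).take k).sum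

theorem pvQ_step (xs : List Int) (mm i : Nat) (hi : i < mm) (hlen : mm ≤ xs.length) :
    pvQ xs mm (i + 1) = pvQ xs mm i + (PySem.List.pyGet? xs (i : Int)).getD 0 := by
  unfold pvQ
  have hix : i < xs.length := by omega
  have h1 : (xs.take mm).take (i+1) = (xs.take mm).take i ++ [xs[i]] := by
    rw [List.take_add_one]
    have : (xs.take mm)[i]? = some xs[i] := by
      rw [List.getElem?_take_of_lt hi, List.getElem?_eq_getElem hix]
    simp [this]
  rw [h1]
  simp [PySem.List.pyGet?_natCast, List.getElem?_eq_getElem hix]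

theorem pvQ_prefix (xs : List Int) (mm k : Nat) (hk : k ≤ mm) (hlen : mm ≤ xs.length) :
    (pvB_prefix (xs.take mm)).getD k 0 = pvQ xs mm k := by
  apply pvB_prefix_getD
  simpa [List.length_take] using (by omega : k ≤ min mm xs.length)

theorem pvA_tail_sum (a : List Int) (m : Int) (mm : Nat) (hm : mm = m.toNat)
    (hlen : mm ≤ a.length) : ∀ (fuel i : Nat) (s : Int), i ≤ mm → mm ≤ fuel + i →
    pvA_tail a m fuel i s = s + (pvQ a mm mm - pvQ a mm i) := by
  intro fuel
  induction fuel with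
  | zero =>
      intro i s hi hf
      have hieq : i = mm := by omega
      subst hieq
      simp [pvA_tail]
  | succ f ih =>
      intro i s hi hf
      rw [pvA_tail]
      by_cases hc : (i : Int) < m
      · have hlt : i < mm := by omega
        rw [if_pos hc, ih (i + 1) _ (by omega) (by omega)]
        rw [pvQ_step a mm i hlt hlen]
        ring
      · have hieq : i = mm := by omega
        subst hieq
        rw [if_neg hc]
        simp

-- getD-form of the element read in the B fold
theorem pv_getD_eq (a : List Int) (i : Nat) (hi : i < a.length) :
    a.getD i 0 = (PySem.List.pyGet? a (i : Int)).getD 0 := by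
  simp [PySem.List.pyGet?_natCast, List.getD, List.getElem?_eq_getElem hi]

-- the main invariant: A's loop + tails equals B's fold over the recorded matches
theorem pv_main (a b : List Int) (m n : Int) (mm nn : Nat)
    (hm : mm = m.toNat) (hn : nn = n.toNat)
    (hla : mm ≤ a.length) (hlb : nn ≤ b.length) :
    ∀ (fuel i j pi pj : Nat) (res : Int),
    (mm - i) + (nn - j) ≤ fuel → pi ≤ i → i ≤ mm → pj ≤ j → j ≤ nn →
    (let st := pvA_loop1 a b m n fuel i j res (pvQ a mm i - pvQ a mm pi) (pvQ b nn j - pvQ b nn pj);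
     st.2.2.1 + max (pvA_tail a m mm st.1 st.2.2.2.1) (pvA_tail b n nn st.2.1 st.2.2.2.2))
    = (let st := (pvB_matches a b m n fuel i j).foldl (fun (st : Int × Nat × Nat) ij =>
        (st.1 + max ((pvB_prefix (a.take mm)).getD ij.1 0 - (pvB_prefix (a.take mm)).getD st.2.1 0)
                    ((pvB_prefix (b.take nn)).getD ij.2 0 - (pvB_prefix (b.take nn)).getD st.2.2 0)
            + a.getD ij.1 0,
         ij.1 + 1, ij.2 + 1)) (res, pi, pj);
       st.1 + max ((pvB_prefix (a.take mm)).getD mm 0 - (pvB_prefix (a.take mm)).getD st.2.1 0)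
                  ((pvB_prefix (b.take nn)).getD nn 0 - (pvB_prefix (b.take nn)).getD st.2.2 0)) := by
  intro fuel
  induction fuel with
  | zero =>
      intro i j pi pj res hfuel hpi hi hpj hj
      have hieq : i = mm := by omega
      have hjeq : j = nn := by omega
      rw [pvA_loop1, pvB_matches]
      simp only [List.foldl_nil]
      rw [pvA_tail_sum a m mm hm hla mm i _ hi (by omega),
          pvA_tail_sum b n nn hn hlb nn j _ hj (by omega),
          pvQ_prefix a mm mm (le_refl _) hla, pvQ_prefix a mm pi (by omega) hla,
          pvQ_prefix b nn nn (le_refl _) hlb, pvQ_prefix b nn pj (by omega) hlb]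
      have e1 : pvQ a mm i - pvQ a mm pi + (pvQ a mm mm - pvQ a mm i) = pvQ a mm mm - pvQ a mm pi := by ring
      have e2 : pvQ b nn j - pvQ b nn pj + (pvQ b nn nn - pvQ b nn j) = pvQ b nn nn - pvQ b nn pj := by ring
      rw [e1, e2]
  | succ fuel ih =>
      intro i j pi pj res hfuel hpi hi hpj hj
      rw [pvA_loop1, pvB_matches]
      by_cases hcond : (i : Int) < m ∧ (j : Int) < n
      · have hilt : i < mm := by omega
        have hjlt : j < nn := by omega
        rw [if_pos hcond, if_pos hcond]
        set x := (PySem.List.pyGet? a (i : Int)).getD 0 with hx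
        set y := (PySem.List.pyGet? b (j : Int)).getD 0 with hy
        by_cases h1 : x < y
        · rw [if_pos h1, if_pos h1]
          have harg : pvQ a mm i - pvQ a mm pi + x = pvQ a mm (i + 1) - pvQ a mm pi := by
            rw [hx, pvQ_step a mm i hilt hla]; ring
          rw [harg]
          exact ih (i+1) j pi pj res (by omega) (by omega) (by omega) hpj hj
        · rw [if_neg h1, if_neg h1]
          by_cases h2 : y < x
          · rw [if_pos h2, if_pos h2]
            have harg : pvQ b nn j - pvQ b nn pj + y = pvQ b nn (j + 1) - pvQ b nn pj := by
              rw [hy, pvQ_step b nn j hjlt hlb]; ring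
            rw [harg]
            exact ih i (j+1) pi pj res (by omega) hpi hi (by omega) (by omega)
          · rw [if_neg h2, if_neg h2]
            have hinit : res + max (pvQ a mm i - pvQ a mm pi) (pvQ b nn j - pvQ b nn pj) + x
                = res + max ((pvB_prefix (a.take mm)).getD i 0 - (pvB_prefix (a.take mm)).getD pi 0)
                            ((pvB_prefix (b.take nn)).getD j 0 - (pvB_prefix (b.take nn)).getD pj 0)
                    + a.getD i 0 := by
              rw [hx, pvQ_prefix a mm i (by omega) hla, pvQ_prefix a mm pi (by omega) hla,
                  pvQ_prefix b nn j (by omega) hlb, pvQ_prefix b nn pj (by omega) hlb,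
                  pv_getD_eq a i (by omega)]
            rw [hinit]
            have := ih (i+1) (j+1) (i+1) (j+1)
              (res + max ((pvB_prefix (a.take mm)).getD i 0 - (pvB_prefix (a.take mm)).getD pi 0)
                         ((pvB_prefix (b.take nn)).getD j 0 - (pvB_prefix (b.take nn)).getD pj 0)
                  + a.getD i 0)
              (by omega) (le_refl _) (by omega) (le_refl _) (by omega)
            simp only [sub_self] at this
            exact this
      · rw [if_neg hcond, if_neg hcond]
        simp only [List.foldl_nil]
        rw [pvA_tail_sum a m mm hm hla mm i _ hi (by omega),
            pvA_tail_sum b n nn hn hlb nn j _ hj (by omega),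
            pvQ_prefix a mm mm (le_refl _) hla, pvQ_prefix a mm pi (by omega) hla,
            pvQ_prefix b nn nn (le_refl _) hlb, pvQ_prefix b nn pj (by omega) hlb]
        have e1 : pvQ a mm i - pvQ a mm pi + (pvQ a mm mm - pvQ a mm i) = pvQ a mm mm - pvQ a mm pi := by ring
        have e2 : pvQ b nn j - pvQ b nn pj + (pvQ b nn nn - pvQ b nn j) = pvQ b nn nn - pvQ b nn pj := by ring
        rw [e1, e2]

-- ===== VERDICT (by name: the statement is the Claim_ definition above) =====
theorem maxSumPath_spec : Claim_equal_maxSumPath := by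
  intro arr1 arr2 m n _ hpre
  obtain ⟨h1, h2⟩ := hpre
  unfold Spec_maxSumPath maxSumPath maxSumPath_alt
  have := pv_main arr1 arr2 m n m.toNat n.toNat rfl rfl (by omega) (by omega)
    (m.toNat + n.toNat) 0 0 0 0 0 (by omega) (le_refl _) (by omega) (le_refl _) (by omega)
  simpa using this
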